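-- pv_equiv track=rewrite | github.com/bowook/Programmers | 프로그래머스/lv1/42840. 모의고사/모의고사.py | solution
-- ===== SOURCE A (Python) =====
-- def solution(answers):
--     answers_len = len(answers)
--     score = [0,0,0]
--     first_std = [1,2,3,4,5] * answers_len
--     second_std = [2,1,2,3,2,4,2,5] * answers_len
--     third_std = [3,3,1,1,2,2,4,4,5,5] * answers_len
--     for index, value in enumerate(answers):
--         if answers[index] ==  first_std[index]:
--             score[0] += 1
--         if answers[index] == second_std[index]:
--             score[1] += 1
--         if answers[index] == third_std[index]:
--             score[2] += 1
--     if score.count(max(score)) == 3: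
--         score = [1, 2, 3]
--     elif score.count(max(score)) == 2:
--         if max(score) == score[0] and max(score) == score[1]:
--             score = [1,2]
--         elif max(score) == score[0] and max(score) == score[2]:
--             score = [1,3]
--         elif max(score) == score[1] and max(score) == score[2]:
--             score = [2,3]
--     elif score.count(max(score)) == 1:
--         if max(score) == score[0]:
--             score = [1]
--         elif max(score) == score[1]:
--             score = [2]
--         else:
--             score = [3]
--
--
--     return score
-- ===== SOURCE B (Python) =====
-- CYCLES = [[1, 2, 3, 4, 5] * 8,
--           [2, 1, 2, 3, 2, 4, 2, 5] * 5,
--           [3, 3, 1, 1, 2, 2, 4, 4, 5, 5] * 4]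
--
--
-- def solution(answers):
--     # One histogram pass: bucket the answers by (position mod 40, value);
--     # 40 is the lcm of the three pattern lengths, so each student's score is
--     # just 40 histogram lookups against their full 40-answer cycle.
--     hist = {}
--     for i, v in enumerate(answers):
--         key = (i % 40, v)
--         hist[key] = hist.get(key, 0) + 1
--     score = [sum(hist.get((t, cyc[t]), 0) for t in range(40)) for cyc in CYCLES]
--     m = max(score)
--     return [k + 1 for k, s in enumerate(score) if s == m]
-- ===== Notes on version B (the rewrite author's own statement) =====
-- stated objective: alternative
-- what changed: B never compares answers against patterns while scanning: one pass buckets the answers into a histogram keyed by (index mod 40, value) (40 = lcm of the pattern lengths), each student's score is then read off by 40 histogram lookups against their 40-answer cycle, and the 7-branch tie-break cascade is replaced by a max-filter over the score list.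
import Mathlib
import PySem

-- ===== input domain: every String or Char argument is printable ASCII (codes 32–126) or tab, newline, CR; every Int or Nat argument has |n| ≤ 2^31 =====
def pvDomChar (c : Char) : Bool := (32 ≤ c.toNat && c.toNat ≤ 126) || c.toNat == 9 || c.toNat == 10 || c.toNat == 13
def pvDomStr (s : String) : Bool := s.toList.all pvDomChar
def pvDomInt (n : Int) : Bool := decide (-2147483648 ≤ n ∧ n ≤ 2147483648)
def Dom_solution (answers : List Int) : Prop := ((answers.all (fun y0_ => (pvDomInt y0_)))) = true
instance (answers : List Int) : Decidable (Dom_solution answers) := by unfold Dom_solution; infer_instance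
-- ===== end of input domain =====

-- B scores via a histogram of (index mod 40, value) pairs read back with 40 lookups per
-- student (40 = lcm of the pattern lengths) and a max-filter instead of A's tie-break
-- cascade; objective: alternative (same O(n) time, no replicated pattern lists).

-- ===== PORT A =====
-- score is Python's fixed 3-slot list, modelled as the triple (score[0], score[1], score[2]).
-- Every index used is in range (enumerate indices; the _std lists have ≥ 5·len elements),
-- so xs[i] is ported as pyGetD xs i 0, and max(score) on the 3-element list never raises.
def solution (answers : List Int) : List Int :=
  let answersLen := PySem.List.len answers
  let firstStd := PySem.List.pyRepeat ([1,2,3,4,5] : List Int) answersLen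
  let secondStd := PySem.List.pyRepeat ([2,1,2,3,2,4,2,5] : List Int) answersLen
  let thirdStd := PySem.List.pyRepeat ([3,3,1,1,2,2,4,4,5,5] : List Int) answersLen
  let score : Int × Int × Int :=
    (PySem.List.enumerate answers).foldl (fun s iv =>
      let s := if PySem.List.pyGetD answers iv.1 0 = PySem.List.pyGetD firstStd iv.1 0
               then (s.1 + 1, s.2.1, s.2.2) else s
      let s := if PySem.List.pyGetD answers iv.1 0 = PySem.List.pyGetD secondStd iv.1 0
               then (s.1, s.2.1 + 1, s.2.2) else s
      if PySem.List.pyGetD answers iv.1 0 = PySem.List.pyGetD thirdStd iv.1 0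
      then (s.1, s.2.1, s.2.2 + 1) else s)
      (0, 0, 0)
  let scoreL : List Int := [score.1, score.2.1, score.2.2]
  let m := (PySem.List.max? scoreL (fun y => y)).getD 0
  let cnt := PySem.List.count scoreL m
  if cnt = 3 then [1, 2, 3]
  else if cnt = 2 then
    if m = score.1 ∧ m = score.2.1 then [1, 2]
    else if m = score.1 ∧ m = score.2.2 then [1, 3]
    else if m = score.2.1 ∧ m = score.2.2 then [2, 3]
    else scoreL
  else if cnt = 1 then
    if m = score.1 then [1]
    else if m = score.2.1 then [2]
    else [3]
  else scoreL

-- ===== PORT B =====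
-- CYCLES: the module-level constant of Source B, each pattern repeated to length 40 (= lcm 5 8 10)
def pvCycles : List (List Int) :=
  [[1,2,3,4,5,1,2,3,4,5,1,2,3,4,5,1,2,3,4,5,1,2,3,4,5,1,2,3,4,5,1,2,3,4,5,1,2,3,4,5],
   [2,1,2,3,2,4,2,5,2,1,2,3,2,4,2,5,2,1,2,3,2,4,2,5,2,1,2,3,2,4,2,5,2,1,2,3,2,4,2,5],
   [3,3,1,1,2,2,4,4,5,5,3,3,1,1,2,2,4,4,5,5,3,3,1,1,2,2,4,4,5,5,3,3,1,1,2,2,4,4,5,5]]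

def solution_alt (answers : List Int) : List Int :=
  let hist : PySem.Dict (Int × Int) Int :=
    (PySem.List.enumerate answers).foldl (fun d iv =>
      let key := (PySem.Int.mod iv.1 40, iv.2)
      d.insert key (d.getD key 0 + 1)) PySem.Dict.empty
  let score : List Int :=
    pvCycles.map (fun cyc =>
      ((PySem.List.pyRange 0 40 1).map (fun t =>
        hist.getD (t, PySem.List.pyGetD cyc t 0) 0)).sum)
  let m := (PySem.List.max? score (fun y => y)).getD 0
  (PySem.List.enumerate score).foldl (fun acc ks =>
    if ks.2 = m then acc ++ [ks.1 + 1] else acc) []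

-- ===== PRECONDITION & SPEC =====
def Spec_solution (answers : List Int) (out : List Int) : Prop := out = solution_alt answers
instance (answers : List Int) (out : List Int) : Decidable (Spec_solution answers out) := by unfold Spec_solution; infer_instance

-- ===== CLAIM (what is proved, stated in full; the proofs are below) =====
def Claim_equal_solution : Prop := ∀ (answers : List Int), Dom_solution answers → Spec_solution answers (solution answers)

-- ===== LEMMAS AND PROOFS =====

-- indexing a repeated copy of a nonempty list = indexing the base list modulo its length
theorem getD_pyRepeat (L : List Int) (n k : Nat) (hL : L ≠ []) (hk : k < n) :
    (PySem.List.pyRepeat L (n : Int)).getD k 0 = L.getD (k % L.length) 0 := by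
  have hlen : 0 < L.length := List.length_pos_iff.mpr hL
  unfold PySem.List.pyRepeat
  simp only [Int.toNat_natCast]
  induction n generalizing k with
  | zero => omega
  | succ n ih =>
    rw [List.replicate_succ, List.flatten_cons]
    by_cases h : k < L.length
    · rw [List.getD_append _ _ _ _ h, Nat.mod_eq_of_lt h]
    · have h' : L.length ≤ k := by omega
      rw [List.getD_append_right _ _ _ _ h']
      have hn : 0 < n := by omega
      rw [ih (k - L.length) (by omega), Nat.mod_eq_sub_mod h']

-- the 40-cycles agree with the base patterns modulo their lengths
theorem cycSpec1 : ∀ r < 40, (pvCycles.getD 0 []).getD r 0 = ([1,2,3,4,5] : List Int).getD (r % 5) 0 := by decide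
theorem cycSpec2 : ∀ r < 40, (pvCycles.getD 1 []).getD r 0 = ([2,1,2,3,2,4,2,5] : List Int).getD (r % 8) 0 := by decide
theorem cycSpec3 : ∀ r < 40, (pvCycles.getD 2 []).getD r 0 = ([3,3,1,1,2,2,4,4,5,5] : List Int).getD (r % 10) 0 := by decide

-- the per-index "this student's cycle matches answer p.2 at position p.1" condition
def pvC (cyc : List Int) (p : Int × Int) : Bool :=
  decide (p.2 = cyc.getD (p.1.toNat % 40) 0)

-- normal form of A's loop body
def pvGA (s : Int × Int × Int) (p : Int × Int) : Int × Int × Int :=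
  let s := if pvC (pvCycles.getD 0 []) p then (s.1 + 1, s.2.1, s.2.2) else s
  let s := if pvC (pvCycles.getD 1 []) p then (s.1, s.2.1 + 1, s.2.2) else s
  if pvC (pvCycles.getD 2 []) p then (s.1, s.2.1, s.2.2 + 1) else s

-- A's scoring loop computes the pvGA fold
theorem stepA (answers : List Int) :
    (PySem.List.enumerate answers).foldl (fun s iv =>
      let s := if PySem.List.pyGetD answers iv.1 0 =
                  PySem.List.pyGetD (PySem.List.pyRepeat ([1,2,3,4,5] : List Int) (PySem.List.len answers)) iv.1 0
               then (s.1 + 1, s.2.1, s.2.2) else s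
      let s := if PySem.List.pyGetD answers iv.1 0 =
                  PySem.List.pyGetD (PySem.List.pyRepeat ([2,1,2,3,2,4,2,5] : List Int) (PySem.List.len answers)) iv.1 0
               then (s.1, s.2.1 + 1, s.2.2) else s
      if PySem.List.pyGetD answers iv.1 0 =
         PySem.List.pyGetD (PySem.List.pyRepeat ([3,3,1,1,2,2,4,4,5,5] : List Int) (PySem.List.len answers)) iv.1 0
      then (s.1, s.2.1, s.2.2 + 1) else s) (0, 0, 0)
    = (PySem.List.enumerate answers).foldl pvGA (0, 0, 0) := by
  apply PySem.List.foldl_congr_mem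
  intro acc p hp
  rw [PySem.List.mem_enumerate_iff] at hp
  obtain ⟨k, hk, rfl⟩ := hp
  simp only [zero_add]
  have hidx : PySem.List.pyGetD answers ((k : Int)) 0 = answers[k] := by
    simp [List.getElem?_eq_getElem hk]
  have hrep : ∀ L : List Int, L ≠ [] →
      PySem.List.pyGetD (PySem.List.pyRepeat L (PySem.List.len answers)) ((k : Int)) 0
        = L.getD (k % L.length) 0 := by
    intro L hL
    simp only [PySem.List.pyGetD_natCast, PySem.List.len_eq]
    rw [getD_pyRepeat L _ k hL hk]
  have hr : k % 40 < 40 := Nat.mod_lt _ (by norm_num)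
  have e1 : ([1,2,3,4,5] : List Int).getD (k % 5) 0 = (pvCycles.getD 0 []).getD (k % 40) 0 := by
    rw [← Nat.mod_mod_of_dvd k (by norm_num : (5:Nat) ∣ 40)]
    exact (cycSpec1 (k % 40) hr).symm
  have e2 : ([2,1,2,3,2,4,2,5] : List Int).getD (k % 8) 0 = (pvCycles.getD 1 []).getD (k % 40) 0 := by
    rw [← Nat.mod_mod_of_dvd k (by norm_num : (8:Nat) ∣ 40)]
    exact (cycSpec2 (k % 40) hr).symm
  have e3 : ([3,3,1,1,2,2,4,4,5,5] : List Int).getD (k % 10) 0 = (pvCycles.getD 2 []).getD (k % 40) 0 := by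
    rw [← Nat.mod_mod_of_dvd k (by norm_num : (10:Nat) ∣ 40)]
    exact (cycSpec3 (k % 40) hr).symm
  simp only [hidx, hrep [1,2,3,4,5] (by simp), hrep [2,1,2,3,2,4,2,5] (by simp),
    hrep [3,3,1,1,2,2,4,4,5,5] (by simp),
    show ([1,2,3,4,5] : List Int).length = 5 from rfl,
    show ([2,1,2,3,2,4,2,5] : List Int).length = 8 from rfl,
    show ([3,3,1,1,2,2,4,4,5,5] : List Int).length = 10 from rfl,
    e1, e2, e3, pvGA, pvC, Int.toNat_natCast, decide_eq_true_eq]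

-- the pvGA fold counts matches per student
theorem foldl_pvGA (l : List (Int × Int)) (x y z : Int) :
    l.foldl pvGA (x, y, z) =
      (x + l.countP (pvC (pvCycles.getD 0 [])),
       y + l.countP (pvC (pvCycles.getD 1 [])),
       z + l.countP (pvC (pvCycles.getD 2 []))) := by
  induction l generalizing x y z with
  | nil => simp
  | cons p t ih =>
    simp only [List.foldl_cons, List.countP_cons]
    rw [show List.foldl pvGA (pvGA (x, y, z) p) t
          = List.foldl pvGA ((pvGA (x, y, z) p).1, (pvGA (x, y, z) p).2.1, (pvGA (x, y, z) p).2.2) t from rfl,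
        ih]
    unfold pvGA
    split_ifs <;> simp [*, Prod.ext_iff] <;> try ring_nf
    all_goals simp

-- summing an indicator of one residue over range 40
theorem indicator_sum (r : Nat) (hr : r < 40) (Q : Prop) [Decidable Q] :
    ((List.range 40).map (fun k => if k = r ∧ Q then (1 : Int) else 0)).sum
      = if Q then 1 else 0 := by
  by_cases hQ : Q
  · simp only [hQ, and_true, if_true]
    rw [show (fun k => if k = r then (1:Int) else 0)
          = (fun k => if (fun k => decide (k = r)) k = true then (1:Int) else 0) from by
        funext k; simp]
    rw [PySem.List.sum_map_ite_one_zero]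
    rw [show List.countP (fun k => decide (k = r)) (List.range 40)
          = List.count r (List.range 40) from by
        simp [List.count]; rfl]
    rw [List.count_eq_one_of_mem (List.nodup_range) (List.mem_range.mpr hr)]
    rfl
  · simp [hQ]

-- the histogram read-back per cycle counts exactly the matches of that cycle
theorem count_sum (l : List (Int × Int)) (hl : ∀ p ∈ l, 0 ≤ p.1) (cyc : List Int) :
    ((List.range 40).map (fun k =>
        ((l.map (fun iv => (PySem.Int.mod iv.1 40, iv.2))).count (((k : Nat) : Int), cyc.getD k 0) : Int))).sum
      = (l.countP (pvC cyc) : Int) := by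
  induction l with
  | nil => simp
  | cons p t ih =>
    have hp : 0 ≤ p.1 := hl p (by simp)
    have ht : ∀ q ∈ t, 0 ≤ q.1 := fun q hq => hl q (by simp [hq])
    have hm : PySem.Int.mod p.1 40 = ((p.1.toNat % 40 : Nat) : Int) := by
      rw [show p.1 = ((p.1.toNat : Nat) : Int) from (Int.toNat_of_nonneg hp).symm]
      exact_mod_cast PySem.Int.mod_natCast p.1.toNat 40
    simp only [List.map_cons, List.count_cons, List.countP_cons, beq_iff_eq]
    have hfun : ∀ k ∈ List.range 40,
        (((t.map (fun iv => (PySem.Int.mod iv.1 40, iv.2))).count (((k : Nat) : Int), cyc.getD k 0)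
            + if ((PySem.Int.mod p.1 40, p.2) = (((k : Nat) : Int), cyc.getD k 0)) then 1 else 0 : Nat) : Int)
          = ((t.map (fun iv => (PySem.Int.mod iv.1 40, iv.2))).count (((k : Nat) : Int), cyc.getD k 0) : Int)
            + (if (k = p.1.toNat % 40 ∧ p.2 = cyc.getD (p.1.toNat % 40) 0) then (1 : Int) else 0) := by
      intro k _
      rw [hm]
      by_cases hk : k = p.1.toNat % 40
      · subst hk
        by_cases hQ : p.2 = cyc.getD (p.1.toNat % 40) 0 <;>
          simp [hQ, Prod.ext_iff]
      · have hne : ¬ (((p.1.toNat % 40 : Nat) : Int), p.2) = (((k : Nat) : Int), cyc.getD k 0) := by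
          simp only [Prod.mk.injEq, not_and]
          intro h
          exact absurd (by exact_mod_cast h.symm : k = p.1.toNat % 40) hk
        rw [if_neg hne, if_neg (fun h => hk h.1)]
        push_cast
        ring
    rw [List.map_congr_left hfun, PySem.List.sum_map_add_int, ih ht,
        indicator_sum (p.1.toNat % 40) (Nat.mod_lt _ (by norm_num)) _]
    simp only [pvC, decide_eq_true_eq]
    split_ifs <;> push_cast <;> ring

-- B's max-filter on [a,b,c] equals A's tie-break cascade
theorem tail_eq (a b c : Int) :
    (PySem.List.enumerate [a,b,c]).foldl
      (fun acc ks => if ks.2 = (PySem.List.max? [a,b,c] (fun y => y)).getD 0 then acc ++ [ks.1 + 1] else acc) []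
    =
    (let m := (PySem.List.max? [a,b,c] (fun y => y)).getD 0
     let cnt := PySem.List.count [a,b,c] m
     if cnt = 3 then [1, 2, 3]
     else if cnt = 2 then
       if m = a ∧ m = b then [1, 2]
       else if m = a ∧ m = c then [1, 3]
       else if m = b ∧ m = c then [2, 3]
       else [a, b, c]
     else if cnt = 1 then
       if m = a then [1]
       else if m = b then [2]
       else [3]
     else [a, b, c]) := by
  have hm : (PySem.List.max? [a,b,c] (fun y => y)).getD 0 = max (max a b) c := by
    rw [show ([a,b,c] : List Int) = a :: [b,c] from rfl, PySem.List.max?_id_cons]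
    simp [List.foldl]
  have hmem : max (max a b) c = a ∨ max (max a b) c = b ∨ max (max a b) c = c := by
    rcases max_choice (max a b) c with h | h
    · rcases max_choice a b with h' | h' <;> rw [h, h'] <;> simp
    · simp [h]
  rw [hm]
  set M := max (max a b) c with hM
  simp only [PySem.List.enumerate, PySem.List.count, List.count_cons, List.count_nil, List.foldl]
  by_cases ha : a = M <;> by_cases hb : b = M <;> by_cases hc : c = M <;>
    simp [ha, hb, hc] <;>
    first
      | tauto
      | (rw [if_neg (fun h => ha h.symm), if_neg (fun h => hb h.symm)])
      | (rw [if_neg (fun h => ha h.symm), if_neg (fun h => ha h.symm)])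

-- B's scores equal the countP's
theorem stepB (answers : List Int) :
    (pvCycles.map (fun cyc =>
      ((PySem.List.pyRange 0 40 1).map (fun t =>
        ((PySem.List.enumerate answers).foldl (fun d iv =>
            let key := (PySem.Int.mod iv.1 40, iv.2)
            d.insert key (d.getD key 0 + 1)) PySem.Dict.empty).getD (t, PySem.List.pyGetD cyc t 0) 0)).sum))
    = [((PySem.List.enumerate answers).countP (pvC (pvCycles.getD 0 [])) : Int),
       ((PySem.List.enumerate answers).countP (pvC (pvCycles.getD 1 [])) : Int),
       ((PySem.List.enumerate answers).countP (pvC (pvCycles.getD 2 [])) : Int)] := by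
  have hhist : ((PySem.List.enumerate answers).foldl (fun d iv =>
        let key := (PySem.Int.mod iv.1 40, iv.2)
        d.insert key (d.getD key 0 + 1)) PySem.Dict.empty)
      = PySem.Dict.counter ((PySem.List.enumerate answers).map (fun iv => (PySem.Int.mod iv.1 40, iv.2))) := by
    unfold PySem.Dict.counter
    rw [List.foldl_map]
    rfl
  have hnn : ∀ p ∈ PySem.List.enumerate answers, 0 ≤ p.1 := by
    intro p hp
    rw [PySem.List.mem_enumerate_iff] at hp
    obtain ⟨k, hk, rfl⟩ := hp
    simp
  have hcyc : ∀ cyc ∈ pvCycles,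
      ((PySem.List.pyRange 0 40 1).map (fun t =>
        (PySem.Dict.counter ((PySem.List.enumerate answers).map (fun iv => (PySem.Int.mod iv.1 40, iv.2)))).getD
          (t, PySem.List.pyGetD cyc t 0) 0)).sum
      = ((PySem.List.enumerate answers).countP (pvC cyc) : Int) := by
    intro cyc _
    rw [PySem.List.pyRange_one, List.map_map]
    simp only [Function.comp_def, zero_add]
    rw [show ((40 : Int) - 0).toNat = 40 from rfl]
    have hfun2 : ∀ k ∈ List.range 40,
        (PySem.Dict.counter ((PySem.List.enumerate answers).map (fun iv => (PySem.Int.mod iv.1 40, iv.2)))).getD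
            ((k : Int), PySem.List.pyGetD cyc (k : Int) 0) 0
          = (((PySem.List.enumerate answers).map (fun iv => (PySem.Int.mod iv.1 40, iv.2))).count
              (((k : Nat) : Int), cyc.getD k 0) : Int) := by
      intro k _
      simp only [PySem.List.pyGetD_natCast]
      rw [PySem.Dict.getD_counter]
    rw [List.map_congr_left hfun2]
    exact count_sum (PySem.List.enumerate answers) hnn cyc
  rw [hhist]
  simp only [pvCycles, List.map_cons, List.map_nil]
  rw [hcyc _ (by simp [pvCycles]), hcyc _ (by simp [pvCycles]), hcyc _ (by simp [pvCycles])]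
  rfl

theorem result_eq (answers : List Int) :
    solution_alt answers = solution answers := by
  unfold solution solution_alt
  simp only [stepA, stepB, foldl_pvGA, zero_add]
  exact tail_eq _ _ _

-- ===== VERDICT (by name: the statement is the Claim_ definition above) =====
theorem solution_spec : Claim_equal_solution := by
  intro answers _
  unfold Spec_solution
  exact (result_eq answers).symm
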